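-- pv_equiv track=rewrite | github.com/DontSeeSharp/PythonExcercises | EX12.py | pair_frequency
-- ===== SOURCE A (Python) =====
-- def pair_frequency(word_list):
--     """Take a list of words and convert it to a dictionary, which keys are Estonian alphabet character pair combinations."""
--     word_list = ' '.join(word_list)
--     alphabet_list = [
--         'a',
--         'b',
--         'c',
--         'd',
--         'e',
--         'f',
--         'g',
--         'h',
--         'i',
--         'j',
--         'k',
--         'l',
--         'm',
--         'n',
--         'o',
--         'p',
--         'q',
--         'r',
--         's',
--         'š',
--         'z',
--         'ž',
--         't',
--         'u',
--         'v',
--         'w',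
--         'õ',
--         'ä',
--         'ö',
--         'ü',
--         'x',
--         'y']
--     pair_dictionary = {}
--     for character in alphabet_list:
--         for number in range(len(alphabet_list)):
--             dict_key = character + alphabet_list[number]
--             if dict_key in pair_dictionary:
--                 pair_dictionary[dict_key] += word_list.count(dict_key)
--             else:
--                 if word_list.count(dict_key) != 0:
--                     pair_dictionary[dict_key] = word_list.count(dict_key)
--     return pair_dictionary
-- ===== SOURCE B (Python) =====
-- def pair_frequency(word_list):
--     """Take a list of words and convert it to a dictionary, which keys are Estonian alphabet character pair combinations."""
--     alphabet = list('abcdefghijklmnopqrsšzžtuvwõäöüxy')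
--     aset = set(alphabet)
--     text = ' '.join(word_list)
--     counts = {}
--     i, n = 0, len(text)
--     while i < n:
--         c = text[i]
--         j = i + 1
--         while j < n and text[j] == c:
--             j += 1
--         if c in aset:
--             if j - i >= 2:
--                 counts[c + c] = counts.get(c + c, 0) + (j - i) // 2
--             if j < n and text[j] in aset:
--                 counts[c + text[j]] = counts.get(c + text[j], 0) + 1
--         i = j
--     return {a + b: counts[a + b] for a in alphabet for b in alphabet if a + b in counts}
-- ===== Notes on version B (the rewrite author's own statement) =====
-- stated objective: alternative
-- what changed: A runs str.count over the joined text once for each of the 32*32 alphabet pairs; B makes a single run-length pass over the text, tallying adjacent-character pairs (a run of one repeated character contributes length//2, matching str.count's non-overlapping semantics), then assembles the dict in alphabet order.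
import Mathlib
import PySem

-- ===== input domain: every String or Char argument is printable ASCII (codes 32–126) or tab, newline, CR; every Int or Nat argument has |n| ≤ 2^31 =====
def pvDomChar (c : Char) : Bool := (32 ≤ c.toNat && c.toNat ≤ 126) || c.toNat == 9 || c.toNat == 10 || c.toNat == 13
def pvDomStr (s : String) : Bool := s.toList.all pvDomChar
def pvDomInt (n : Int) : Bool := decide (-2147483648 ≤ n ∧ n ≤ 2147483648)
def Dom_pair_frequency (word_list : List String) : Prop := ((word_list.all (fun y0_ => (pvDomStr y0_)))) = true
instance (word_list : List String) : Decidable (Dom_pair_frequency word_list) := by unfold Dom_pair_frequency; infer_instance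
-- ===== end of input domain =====

-- B replaces A's 32x32 passes of str.count over the joined text by ONE run-length scan of the
-- text that tallies adjacent pairs (a run of one repeated character contributes length // 2),
-- then assembles the dictionary in alphabet order; same return value.

-- ===== PORT A =====
def estAlphaA : List Char :=
  ['a','b','c','d','e','f','g','h','i','j','k','l','m','n','o','p','q','r','s','š','z','ž',
   't','u','v','w','õ','ä','ö','ü','x','y']
def pair_frequency (word_list : List String) : List (String × Int) :=
  let wl : String := PySem.Str.join " " word_list
  let d : PySem.Dict String Int :=
    estAlphaA.foldl (fun d character =>
      (PySem.List.pyRange 0 (PySem.List.len estAlphaA) 1).foldl (fun d number =>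
        let dict_key : String := String.ofList [character, PySem.List.pyGetD estAlphaA number ' ']
        if d.contains dict_key then
          d.modify dict_key 0 (fun v => v + (PySem.Str.count wl dict_key : Int))
        else if (PySem.Str.count wl dict_key : Int) ≠ 0 then
          d.insert dict_key (PySem.Str.count wl dict_key : Int)
        else d) d) PySem.Dict.empty
  d.items

-- ===== PORT B =====
def estAlphaB : List Char := "abcdefghijklmnopqrsšzžtuvwõäöüxy".toList

def runUpdate (c : Char) (L : Nat) (rest' : List Char)
    (counts : PySem.Dict String Int) : PySem.Dict String Int :=
  if c ∈ estAlphaB then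
    let counts :=
      if 2 ≤ L then
        counts.insert (String.ofList [c, c])
          (counts.getD (String.ofList [c, c]) 0 + PySem.Int.floordiv (L : Int) 2)
      else counts
    match rest' with
    | c2 :: _ =>
      if c2 ∈ estAlphaB then
        counts.insert (String.ofList [c, c2]) (counts.getD (String.ofList [c, c2]) 0 + 1)
      else counts
    | [] => counts
  else counts
def scanRuns : List Char → PySem.Dict String Int → PySem.Dict String Int
  | [], counts => counts
  | c :: rest, counts =>
    let rest' := rest.dropWhile (fun x => x == c)
    scanRuns rest' (runUpdate c ((rest.takeWhile (fun x => x == c)).length + 1) rest' counts)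
termination_by s => s.length
decreasing_by
  simp only [List.length_cons]
  exact Nat.lt_succ_of_le (List.length_dropWhile_le _ _)
def pair_frequency_alt (word_list : List String) : List (String × Int) :=
  let text : String := PySem.Str.join " " word_list
  let counts := scanRuns text.toList PySem.Dict.empty
  let out : PySem.Dict String Int :=
    estAlphaB.foldl (fun d a =>
      estAlphaB.foldl (fun d b =>
        let key := String.ofList [a, b]
        if counts.contains key then d.insert key (counts.getD key 0) else d) d) PySem.Dict.empty
  out.items

-- ===== PRECONDITION & SPEC =====
def Spec_pair_frequency (word_list : List String) (out : List (String × Int)) : Prop := out = pair_frequency_alt word_list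
instance (word_list : List String) (out : List (String × Int)) : Decidable (Spec_pair_frequency word_list out) := by unfold Spec_pair_frequency; infer_instance

-- ===== CLAIM (what is proved, stated in full; the proofs are below) =====
def Claim_equal_pair_frequency : Prop := ∀ (word_list : List String), Dom_pair_frequency word_list → Spec_pair_frequency word_list (pair_frequency word_list)

-- ===== LEMMAS AND PROOFS =====
def cnt (c1 c2 : Char) : List Char → Nat
  | x :: y :: rest => if x = c1 ∧ y = c2 then cnt c1 c2 rest + 1 else cnt c1 c2 (y :: rest)
  | _ => 0
termination_by s => s.length

lemma cnt_nil (c1 c2 : Char) : cnt c1 c2 [] = 0 := by simp [cnt]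
lemma cnt_single (c1 c2 x : Char) : cnt c1 c2 [x] = 0 := by simp [cnt]

lemma cnt_cons_of_ne (c1 c2 z : Char) (t : List Char) (h : z ≠ c1) :
    cnt c1 c2 (z :: t) = cnt c1 c2 t := by
  cases t with
  | nil => rw [cnt_single, cnt_nil]
  | cons w t' => rw [cnt, if_neg (by intro e; exact h e.1)]

def runContrib (c c1 c2 : Char) (k : Nat) (rest' : List Char) : Nat :=
  if c1 = c then
    (if c2 = c then k / 2 else if rest'.head? = some c2 then 1 else 0)
  else 0

lemma cnt_replicate (c c1 c2 : Char) : ∀ (k : Nat), 1 ≤ k → ∀ (rest' : List Char),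
    rest'.head? ≠ some c →
    cnt c1 c2 (List.replicate k c ++ rest') = runContrib c c1 c2 k rest' + cnt c1 c2 rest' := by
  intro k
  induction k using Nat.strong_induction_on with
  | _ k ih =>
    intro hk rest' hr
    match k, hk with
    | 1, _ =>
      simp only [List.replicate_one, List.cons_append, List.nil_append]
      cases rest' with
      | nil => simp [cnt_single, cnt_nil, runContrib]
      | cons z t =>
        have hzc : z ≠ c := by intro e; exact hr (by simp [e])
        rw [cnt]
        by_cases hm : c = c1 ∧ z = c2
        · obtain ⟨h1, h2⟩ := hm
          rw [if_pos ⟨h1, h2⟩,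
            cnt_cons_of_ne c1 c2 z t (by rw [← h1]; exact hzc)]
          have h2c : ¬ c2 = c := by rw [← h2]; exact hzc
          have hrc : runContrib c c1 c2 1 (z :: t) = 1 := by
            simp [runContrib, h1.symm, h2c, ← h2, hzc]
          rw [hrc]
          omega
        · rw [if_neg hm]
          simp only [runContrib]
          by_cases h1 : c1 = c
          · by_cases h2 : c2 = c
            · simp [h1, h2, Nat.div_eq_of_lt]
            · have hz2 : ¬ (z :: t).head? = some c2 := by
                simp only [List.head?_cons, Option.some.injEq]
                intro e; exact hm ⟨h1.symm, e⟩
              simp [h1, h2]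
              intro e; exact hm ⟨h1.symm, e⟩
          · simp [h1]
    | (n + 2), _ =>
      have hrepl : (List.replicate (n + 2) c ++ rest' : List Char)
          = c :: c :: (List.replicate n c ++ rest') := by
        simp [List.replicate_succ]
      rw [hrepl]
      by_cases hm : c = c1 ∧ c = c2
      · obtain ⟨h1, h2⟩ := hm
        rw [cnt, if_pos ⟨h1, h2⟩]
        rcases Nat.eq_zero_or_pos n with hn | hn
        · subst hn
          simp only [List.replicate_zero, List.nil_append]
          simp [runContrib, ← h1, ← h2]
          omega
        · rw [ih n (by omega) hn rest' hr]
          simp [runContrib, ← h1, ← h2]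
          omega
      · rw [cnt, if_neg hm]
        have hs : (c :: (List.replicate n c ++ rest') : List Char)
            = List.replicate (n + 1) c ++ rest' := by
          simp [List.replicate_succ]
        rw [hs, ih (n + 1) (by omega) (by omega) rest' hr]
        have he : runContrib c c1 c2 (n + 1) rest' = runContrib c c1 c2 (n + 2) rest' := by
          simp only [runContrib]
          by_cases h1 : c1 = c
          · by_cases h2 : c2 = c
            · exact absurd ⟨h1.symm, h2.symm⟩ hm
            · simp [h1, h2]
          · simp [h1]
        rw [he]

lemma head?_dropWhile_ne (l : List Char) (c : Char) :
    (l.dropWhile (fun x => x == c)).head? ≠ some c := by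
  induction l with
  | nil => simp
  | cons a t ih =>
    rw [List.dropWhile_cons]
    by_cases hac : a = c
    · simp [hac, ih]
    · simp [hac]

lemma takeWhile_eq_replicate (l : List Char) (c : Char) :
    l.takeWhile (fun x => x == c) = List.replicate (l.takeWhile (fun x => x == c)).length c := by
  rw [List.eq_replicate_iff]
  refine ⟨rfl, fun b hb => ?_⟩
  simpa using (List.mem_takeWhile_imp hb)

lemma cnt_run (c1 c2 c : Char) (rest : List Char) :
    cnt c1 c2 (c :: rest)
      = runContrib c c1 c2 ((rest.takeWhile (fun x => x == c)).length + 1)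
          (rest.dropWhile (fun x => x == c))
        + cnt c1 c2 (rest.dropWhile (fun x => x == c)) := by
  have hdecomp : (c :: rest : List Char)
      = List.replicate ((rest.takeWhile (fun x => x == c)).length + 1) c
          ++ rest.dropWhile (fun x => x == c) := by
    conv_lhs => rw [show rest = rest.takeWhile (fun x => x == c) ++ rest.dropWhile (fun x => x == c)
      from (List.takeWhile_append_dropWhile).symm]
    rw [List.replicate_succ]
    simp only [List.cons_append, List.cons.injEq, true_and]
    conv_lhs => rw [takeWhile_eq_replicate]
  rw [hdecomp, cnt_replicate c c1 c2 _ (by omega) _ (head?_dropWhile_ne rest c)]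

lemma key_eq_iff {a b a' b' : Char} :
    String.ofList [a, b] = String.ofList [a', b'] ↔ a = a' ∧ b = b' := by
  constructor
  · intro e
    have := congrArg String.toList e
    simpa using this
  · rintro ⟨rfl, rfl⟩; rfl

lemma runUpdate_get? (c c1 c2 : Char) (hc1 : c1 ∈ estAlphaB) (hc2 : c2 ∈ estAlphaB)
    (L : Nat) (hL : 1 ≤ L) (rest' : List Char) (hrh : rest'.head? ≠ some c)
    (d : PySem.Dict String Int) :
    (runUpdate c L rest' d).get? (String.ofList [c1, c2]) =
      if runContrib c c1 c2 L rest' = 0 then d.get? (String.ofList [c1, c2])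
      else some (d.getD (String.ofList [c1, c2]) 0 + (runContrib c c1 c2 L rest' : Int)) := by
  have hfd : PySem.Int.floordiv (L : Int) 2 = ((L / 2 : Nat) : Int) := by
    exact_mod_cast PySem.Int.floordiv_natCast L 2
  cases rest' with
  | nil =>
    simp only [runUpdate, runContrib, List.head?_nil, hfd]
    split_ifs <;>
      simp_all [PySem.Dict.get?_insert, PySem.Dict.getD_insert, key_eq_iff] <;>
      omega
  | cons z t =>
    have hz : z ≠ c := by intro e; exact hrh (by simp [e])
    simp only [runUpdate, runContrib, List.head?_cons, hfd]
    split_ifs <;>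
      simp_all [PySem.Dict.get?_insert, PySem.Dict.getD_insert, key_eq_iff] <;>
      try omega
    all_goals (intro e; exact absurd e.symm (by assumption))

lemma runUpdate_getD (c c1 c2 : Char) (hc1 : c1 ∈ estAlphaB) (hc2 : c2 ∈ estAlphaB)
    (L : Nat) (hL : 1 ≤ L) (rest' : List Char) (hrh : rest'.head? ≠ some c)
    (d : PySem.Dict String Int) :
    (runUpdate c L rest' d).getD (String.ofList [c1, c2]) 0 =
      d.getD (String.ofList [c1, c2]) 0 + (runContrib c c1 c2 L rest' : Int) := by
  rw [PySem.Dict.getD_eq_get?_getD, runUpdate_get? c c1 c2 hc1 hc2 L hL rest' hrh d]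
  by_cases hR : runContrib c c1 c2 L rest' = 0
  · simp [hR, PySem.Dict.getD_eq_get?_getD]
  · simp [hR]


lemma scan_get? (c1 c2 : Char) (hc1 : c1 ∈ estAlphaB) (hc2 : c2 ∈ estAlphaB) :
    ∀ (n : Nat) (s : List Char), s.length ≤ n → ∀ (d : PySem.Dict String Int),
    (scanRuns s d).get? (String.ofList [c1, c2]) =
      if cnt c1 c2 s = 0 then d.get? (String.ofList [c1, c2])
      else some (d.getD (String.ofList [c1, c2]) 0 + (cnt c1 c2 s : Int)) := by
  intro n
  induction n with
  | zero =>
    intro s hs d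
    have : s = [] := by cases s <;> simp_all
    subst this
    simp [scanRuns, cnt_nil]
  | succ m ih =>
    intro s hs d
    match s with
    | [] => simp [scanRuns, cnt_nil]
    | c :: rest =>
      rw [scanRuns]
      have hlen : (rest.dropWhile (fun x => x == c)).length ≤ m := by
        have h1 := List.length_dropWhile_le (fun x => x == c) rest
        simp only [List.length_cons] at hs
        omega
      rw [ih _ hlen]
      rw [runUpdate_get? c c1 c2 hc1 hc2 _ (by omega) _ (head?_dropWhile_ne rest c) d]
      rw [runUpdate_getD c c1 c2 hc1 hc2 _ (by omega) _ (head?_dropWhile_ne rest c) d]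
      rw [cnt_run c1 c2 c rest]
      set R := runContrib c c1 c2 ((rest.takeWhile (fun x => x == c)).length + 1)
        (rest.dropWhile (fun x => x == c)) with hR
      set C := cnt c1 c2 (rest.dropWhile (fun x => x == c)) with hC
      by_cases hCz : C = 0 <;> by_cases hRz : R = 0
      · simp [hCz, hRz]
      · rw [if_pos hCz, if_neg hRz, if_neg (by omega)]
        simp [hCz]
      · rw [if_neg hCz, if_neg (by omega)]
        push_cast; ring_nf
      · rw [if_neg hCz, if_neg (by omega)]
        push_cast; ring_nf
def keyOf (p : Char × Char) : String := String.ofList [p.1, p.2]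

def stepA (wl : String) (d : PySem.Dict String Int) (p : Char × Char) : PySem.Dict String Int :=
  if d.contains (keyOf p) then
    d.modify (keyOf p) 0 (fun v => v + (PySem.Str.count wl (keyOf p) : Int))
  else if (PySem.Str.count wl (keyOf p) : Int) ≠ 0 then
    d.insert (keyOf p) (PySem.Str.count wl (keyOf p) : Int)
  else d

def stepB (counts d : PySem.Dict String Int) (p : Char × Char) : PySem.Dict String Int :=
  if counts.contains (keyOf p) then d.insert (keyOf p) (counts.getD (keyOf p) 0) else d

lemma foldl_foldl_product {α β : Type} (l1 l2 : List α) (f : β → α → α → β) (init : β) :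
    l1.foldl (fun d a => l2.foldl (fun d b => f d a b) d) init
      = (l1 ×ˢ l2).foldl (fun d p => f d p.1 p.2) init := by
  induction l1 generalizing init with
  | nil => simp [List.product, SProd.sprod]
  | cons a t ih =>
    rw [show ((a :: t) ×ˢ l2 : List (α × α)) = l2.map (a, ·) ++ t ×ˢ l2 from by
      simp [List.product, SProd.sprod]]
    rw [List.foldl_append, List.foldl_map, List.foldl_cons, ih]

lemma fold_eq (wl : String) (counts : PySem.Dict String Int)
    (hc : ∀ p : Char × Char, p.1 ∈ estAlphaA → p.2 ∈ estAlphaA →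
      counts.get? (keyOf p) =
        if (PySem.Str.count wl (keyOf p) : Int) = 0 then none
        else some (PySem.Str.count wl (keyOf p) : Int)) :
    ∀ ps : List (Char × Char), (∀ p ∈ ps, p.1 ∈ estAlphaA ∧ p.2 ∈ estAlphaA) →
      (ps.map keyOf).Nodup →
      ∀ d : PySem.Dict String Int, (∀ p ∈ ps, d.contains (keyOf p) = false) →
      ps.foldl (stepA wl) d = ps.foldl (stepB counts) d := by
  intro ps
  induction ps with
  | nil => intro _ _ d _; rfl
  | cons p ps ih =>
    intro hmem hnd d hdc
    have hp := hmem p (List.mem_cons_self)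
    have hdp := hdc p (List.mem_cons_self)
    have hstep : stepA wl d p = stepB counts d p := by
      rw [stepA, stepB, hdp]
      simp only [Bool.false_eq_true, if_false]
      rw [PySem.Dict.contains_eq_isSome_get?, hc p hp.1 hp.2]
      by_cases hz : (PySem.Str.count wl (keyOf p) : Int) = 0
      · rw [if_neg (not_not_intro hz), if_neg (by rw [if_pos hz]; simp)]
      · rw [if_pos hz, if_pos (by rw [if_neg hz]; simp)]
        rw [PySem.Dict.getD_eq_get?_getD, hc p hp.1 hp.2, if_neg hz]
        rfl
    rw [List.map_cons, List.nodup_cons] at hnd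
    rw [List.foldl_cons, List.foldl_cons, hstep]
    apply ih (fun q hq => hmem q (List.mem_cons_of_mem _ hq)) hnd.2
    intro q hq
    have hne : keyOf q ≠ keyOf p := by
      intro e
      exact hnd.1 (e ▸ List.mem_map_of_mem hq)
    have hdq := hdc q (List.mem_cons_of_mem _ hq)
    rw [stepB]
    by_cases hcc : counts.contains (keyOf p)
    · rw [if_pos hcc, PySem.Dict.contains_insert]
      simp [hne, hdq]
    · rw [if_neg hcc]; exact hdq
lemma count_go_nil (sub : List Char) (fuel acc : Nat) :
    PySem.Chars.count.go sub fuel [] acc = acc := by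
  cases fuel <;> simp [PySem.Chars.count.go]

lemma count_go_eq (c1 c2 : Char) : ∀ (fuel : Nat) (s : List Char) (acc : Nat),
    s.length ≤ fuel → PySem.Chars.count.go [c1, c2] fuel s acc = acc + cnt c1 c2 s := by
  intro fuel
  induction fuel with
  | zero =>
    intro s acc h
    have hs : s = [] := by cases s <;> simp_all
    subst hs; simp [count_go_nil, cnt]
  | succ n ih =>
    intro s acc h
    match s with
    | [] => simp [count_go_nil, cnt]
    | [x] =>
      simp only [PySem.Chars.count.go, List.isPrefixOf, Bool.and_false, Bool.false_eq_true,
        if_false, count_go_nil]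
      simp [cnt]
    | x :: y :: t =>
      simp only [PySem.Chars.count.go, List.isPrefixOf, List.length_cons] at *
      by_cases hm : x = c1 ∧ y = c2
      · obtain ⟨h1, h2⟩ := hm
        subst h1; subst h2
        simp only [BEq.rfl, Bool.and_self, Bool.and_true, if_true, List.drop_succ_cons,
          List.length_nil, List.drop_zero]
        rw [ih t (acc + 1) (by omega)]
        have hc : cnt x y (x :: y :: t) = cnt x y t + 1 := by rw [cnt]; simp
        omega
      · have hb : (c1 == x && (c2 == y && true)) = false := by
          rcases (not_and_or.mp hm) with h' | h' <;> simp [beq_iff_eq] <;> intro e <;>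
            first
            | exact absurd e.symm h'
            | (intro e2; exact absurd e2.symm h')
        rw [hb]
        simp only [Bool.false_eq_true, if_false]
        rw [ih (y :: t) acc (by simp; omega)]
        rw [cnt]; simp only [if_neg hm]

lemma count_eq_cnt (c1 c2 : Char) (s : List Char) :
    PySem.Chars.count s [c1, c2] = cnt c1 c2 s := by
  rw [PySem.Chars.count]
  simp only [List.isEmpty_cons, Bool.false_eq_true, if_false]
  rw [count_go_eq c1 c2 s.length s 0 le_rfl]
  omega

lemma keyOf_injective : Function.Injective keyOf := by
  intro p q e
  rcases p with ⟨a, b⟩; rcases q with ⟨a', b'⟩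
  have := key_eq_iff.mp e
  simp [this.1, this.2, Prod.ext_iff]
  exact this

lemma dict_eq (wl : String) :
    (estAlphaA.foldl (fun d character =>
      (PySem.List.pyRange 0 (PySem.List.len estAlphaA) 1).foldl (fun d number =>
        let dict_key : String := String.ofList [character, PySem.List.pyGetD estAlphaA number ' ']
        if d.contains dict_key then
          d.modify dict_key 0 (fun v => v + (PySem.Str.count wl dict_key : Int))
        else if (PySem.Str.count wl dict_key : Int) ≠ 0 then
          d.insert dict_key (PySem.Str.count wl dict_key : Int)
        else d) d) PySem.Dict.empty)
    = (estAlphaB.foldl (fun d a =>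
        estAlphaB.foldl (fun d b =>
          let key := String.ofList [a, b]
          if (scanRuns wl.toList PySem.Dict.empty).contains key then
            d.insert key ((scanRuns wl.toList PySem.Dict.empty).getD key 0)
          else d) d) PySem.Dict.empty) := by
  have hAinner : ∀ (character : Char) (d : PySem.Dict String Int),
      (PySem.List.pyRange 0 (PySem.List.len estAlphaA) 1).foldl (fun d number =>
        let dict_key : String := String.ofList [character, PySem.List.pyGetD estAlphaA number ' ']
        if d.contains dict_key then
          d.modify dict_key 0 (fun v => v + (PySem.Str.count wl dict_key : Int))
        else if (PySem.Str.count wl dict_key : Int) ≠ 0 then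
          d.insert dict_key (PySem.Str.count wl dict_key : Int)
        else d) d
      = estAlphaA.foldl (fun d ch => stepA wl d (character, ch)) d := by
    intro character d
    exact PySem.List.foldl_pyRange_zero_pyGetD estAlphaA ' '
      (fun d ch => stepA wl d (character, ch)) d
  simp only [hAinner]
  rw [show (estAlphaA.foldl (fun d character =>
        estAlphaA.foldl (fun d ch => stepA wl d (character, ch)) d) PySem.Dict.empty)
      = (estAlphaA ×ˢ estAlphaA).foldl (stepA wl) PySem.Dict.empty from
    foldl_foldl_product estAlphaA estAlphaA (fun d a b => stepA wl d (a, b)) PySem.Dict.empty]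
  rw [show (estAlphaB.foldl (fun d a =>
        estAlphaB.foldl (fun d b =>
          let key := String.ofList [a, b]
          if (scanRuns wl.toList PySem.Dict.empty).contains key then
            d.insert key ((scanRuns wl.toList PySem.Dict.empty).getD key 0)
          else d) d) PySem.Dict.empty)
      = (estAlphaB ×ˢ estAlphaB).foldl (stepB (scanRuns wl.toList PySem.Dict.empty))
          PySem.Dict.empty from
    foldl_foldl_product estAlphaB estAlphaB
      (fun d a b => stepB (scanRuns wl.toList PySem.Dict.empty) d (a, b)) PySem.Dict.empty]
  rw [show estAlphaB = estAlphaA from by decide]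
  apply fold_eq wl (scanRuns wl.toList PySem.Dict.empty)
  · rintro ⟨c1, c2⟩ h1 h2
    have hkey : (keyOf (c1, c2)).toList = [c1, c2] := by simp [keyOf]
    have hcnt : PySem.Str.count wl (keyOf (c1, c2)) = cnt c1 c2 wl.toList := by
      rw [PySem.Str.count, hkey, count_eq_cnt]
    rw [hcnt]
    have hBA : estAlphaB = estAlphaA := by decide
    have hs := scan_get? c1 c2 (hBA ▸ h1) (hBA ▸ h2) wl.toList.length wl.toList le_rfl
      PySem.Dict.empty
    rw [show String.ofList [c1, c2] = keyOf (c1, c2) from rfl] at hs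
    rw [hs]
    by_cases hz : cnt c1 c2 wl.toList = 0
    · simp [hz]
    · rw [if_neg hz, if_neg (by exact_mod_cast hz)]
      simp
  · rintro ⟨c1, c2⟩ hp
    exact List.mem_product.mp hp
  · exact (List.Nodup.product (by decide) (by decide)).map keyOf_injective
  · intro p _
    exact PySem.Dict.contains_empty (keyOf p)

theorem main_eq : ∀ (word_list : List String),
    pair_frequency word_list = pair_frequency_alt word_list := by
  intro word_list
  exact congrArg PySem.Dict.items (dict_eq (PySem.Str.join " " word_list))

-- ===== VERDICT (by name: the statement is the Claim_ definition above) =====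
theorem pair_frequency_spec : Claim_equal_pair_frequency := by
  intro word_list _
  exact main_eq word_list
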